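-- pv_equiv track=rewrite | github.com/xzhou29/DNa-VulBERTa | src/data/transformations/var_renaming_transformation.py | is_return
-- ===== SOURCE A (Python) =====
-- def is_return(v, tokens):
--     check_start = False
--     for i, token in enumerate(tokens):
--         if check_start:
--             if v == token:
--                 return True
--             if token == ';':
--                 check_start = False
--         if token == 'return':
--             check_start = True
--     return False
-- ===== SOURCE B (Python) =====
-- def is_return(v, tokens):
--     for i, token in enumerate(tokens):
--         if token == 'return':
--             for t in tokens[i + 1:]:
--                 if t == v:
--                     return True
--                 if t == ';':
--                     break
--     return False
-- ===== Notes on version B (the rewrite author's own statement) =====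
-- stated objective: alternative
-- what changed: Replaced the single flag-threaded pass with an outer loop over 'return' positions and an inner bounded scan of each return's region up to the next ';'.
import Mathlib
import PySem

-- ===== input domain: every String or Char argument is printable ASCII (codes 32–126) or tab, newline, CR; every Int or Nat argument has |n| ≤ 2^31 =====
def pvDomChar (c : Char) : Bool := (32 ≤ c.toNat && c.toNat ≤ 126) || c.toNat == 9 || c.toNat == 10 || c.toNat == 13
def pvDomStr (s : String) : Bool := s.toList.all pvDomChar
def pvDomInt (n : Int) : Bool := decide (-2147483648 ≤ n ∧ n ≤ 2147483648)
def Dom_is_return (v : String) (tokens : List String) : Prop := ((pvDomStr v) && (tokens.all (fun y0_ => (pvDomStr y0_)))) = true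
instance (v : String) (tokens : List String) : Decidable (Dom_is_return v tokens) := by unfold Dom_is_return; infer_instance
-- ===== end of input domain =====

-- B replaces A's single flag-threaded pass by an outer loop over 'return' tokens with an
-- inner scan of each return's region (up to the next ';'); objective: alternative decomposition.

-- ===== PORT A =====
-- A's loop: carries the check_start flag, early-returns True when the flag is set and v == token.
def isReturnLoop (v : String) (tokens : List String) (check_start : Bool) : Bool :=
  match tokens with
  | [] => false
  | token :: rest =>
    if check_start && v == token then true
    else
      let cs1 := if check_start && token == ";" then false else check_start
      let cs2 := if token == "return" then true else cs1
      isReturnLoop v rest cs2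

def is_return (v : String) (tokens : List String) : Bool :=
  isReturnLoop v tokens false

-- ===== PORT B =====
-- inner scan of Source B: look for v in a region, stopping at ';'
def innerScan (v : String) : List String → Bool
  | [] => false
  | t :: ts => if t == v then true else if t == ";" then false else innerScan v ts

-- outer loop of Source B over suffixes: tokens[i+1:] is exactly the tail at a 'return'
def is_return_alt (v : String) (tokens : List String) : Bool :=
  match tokens with
  | [] => false
  | t :: ts => (if t == "return" then innerScan v ts else false) || is_return_alt v ts

-- ===== PRECONDITION & SPEC =====
def Spec_is_return (v : String) (tokens : List String) (out : Bool) : Prop := out = is_return_alt v tokens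
instance (v : String) (tokens : List String) (out : Bool) : Decidable (Spec_is_return v tokens out) := by unfold Spec_is_return; infer_instance

-- ===== CLAIM (what is proved, stated in full; the proofs are below) =====
def Claim_equal_is_return : Prop := ∀ (v : String) (tokens : List String), Dom_is_return v tokens → Spec_is_return v tokens (is_return v tokens)

-- ===== LEMMAS AND PROOFS =====
-- A's flagged loop equals "flag-opened region ∨ some later return's region contains v".
theorem isReturnLoop_eq (v : String) (tokens : List String) :
    ∀ cs : Bool, isReturnLoop v tokens cs = ((cs && innerScan v tokens) || is_return_alt v tokens) := by
  induction tokens with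
  | nil => intro cs; simp [isReturnLoop, innerScan, is_return_alt]
  | cons t ts ih =>
    intro cs
    rw [isReturnLoop]
    by_cases hv : v = t
    · subst hv
      cases cs <;> by_cases hr : v = "return" <;> by_cases hs : v = ";" <;>
        simp_all [innerScan, is_return_alt, ih]
    · have hv2 : t ≠ v := fun h => hv h.symm
      cases cs <;> by_cases hr : t = "return" <;> by_cases hs : t = ";" <;>
        simp_all [innerScan, is_return_alt, ih]

-- ===== VERDICT (by name: the statement is the Claim_ definition above) =====
theorem is_return_spec : Claim_equal_is_return := by
  intro v tokens _
  unfold Spec_is_return is_return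
  simp [isReturnLoop_eq]
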